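-- pv_equiv track=rewrite | github.com/yoni-j/routes-mcp-israel | server.py | find_stop_code_by_name
-- ===== SOURCE A (Python) =====
-- from typing import Dict, List, Optional
--
-- def find_stop_code_by_name(stops: List[Dict], station_name: str) -> Optional[str]:
--     if not isinstance(stops, list):
--         return None
--
--     station_name_lower = station_name.strip().lower()
--
--     for stop in stops:
--         if stop.get('name') and stop['name'].strip().lower() == station_name_lower:
--             return str(stop.get('code'))
--
--     for stop in stops:
--         if stop.get('name') and station_name_lower in stop['name'].lower():
--             return str(stop.get('code'))
--
--     for stop in stops:
--         if stop.get('name') and stop['name'].lower() in station_name_lower: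
--             return str(stop.get('code'))
--
--     return None
-- ===== SOURCE B (Python) =====
-- def find_stop_code_by_name(stops, station_name):
--     if not isinstance(stops, list):
--         return None
--
--     target = station_name.strip().lower()
--     sub_candidate = None
--     rev_candidate = None
--
--     for stop in stops:
--         name = stop.get('name')
--         if not name:
--             continue
--         name_lower = name.lower()
--         if name.strip().lower() == target:
--             return str(stop.get('code'))
--         if sub_candidate is None and target in name_lower:
--             sub_candidate = str(stop.get('code'))
--         if rev_candidate is None and name_lower in target:
--             rev_candidate = str(stop.get('code'))
--
--     return sub_candidate if sub_candidate is not None else rev_candidate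
-- ===== Notes on version B (the rewrite author's own statement) =====
-- stated objective: alternative
-- what changed: Replaces A's three sequential full scans of the stop list (exact, then substring, then reverse-substring) with a single pass that returns immediately on an exact match and remembers the first substring and first reverse-substring candidates.
import Mathlib
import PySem

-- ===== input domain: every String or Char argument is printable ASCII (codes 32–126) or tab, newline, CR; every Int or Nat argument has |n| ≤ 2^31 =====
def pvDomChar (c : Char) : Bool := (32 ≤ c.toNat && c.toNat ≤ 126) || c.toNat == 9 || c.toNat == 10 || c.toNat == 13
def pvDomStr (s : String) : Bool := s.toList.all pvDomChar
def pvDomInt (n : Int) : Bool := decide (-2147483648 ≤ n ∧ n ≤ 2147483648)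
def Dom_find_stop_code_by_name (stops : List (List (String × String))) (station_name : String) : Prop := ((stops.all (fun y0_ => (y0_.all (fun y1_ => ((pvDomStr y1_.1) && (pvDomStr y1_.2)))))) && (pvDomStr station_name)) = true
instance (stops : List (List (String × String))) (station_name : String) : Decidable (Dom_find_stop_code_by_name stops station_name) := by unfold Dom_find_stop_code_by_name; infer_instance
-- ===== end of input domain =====

-- B replaces A's three full scans (exact, then substring, then reverse-substring) by ONE pass that
-- returns on an exact match and remembers the first substring / first reverse-substring candidates.

-- ===== PORT A =====
-- str(stop.get('code')): the value is a string under the type convention; a missing key gives str(None) = "None"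
def pvCodeOf (stop : List (String × String)) : String :=
  match PySem.Dict.get? (PySem.Dict.mk stop) "code" with
  | some c => c
  | none => "None"

-- stop.get('name') used as a truth value: some n with n ≠ "" is truthy
def pvNameOf (stop : List (String × String)) : Option String :=
  match PySem.Dict.get? (PySem.Dict.mk stop) "name" with
  | some n => if n = "" then none else some n
  | none => none

-- first loop of A: exact match on stripped, lowered names
def pvScanExact (snl : String) : List (List (String × String)) → Option String
  | [] => none
  | s :: t =>
    match pvNameOf s with
    | some n =>
      if PySem.Str.lower (PySem.Str.strip n) = snl then some (pvCodeOf s) else pvScanExact snl t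
    | none => pvScanExact snl t

-- second loop of A: station_name_lower in stop['name'].lower()
def pvScanSub (snl : String) : List (List (String × String)) → Option String
  | [] => none
  | s :: t =>
    match pvNameOf s with
    | some n =>
      if PySem.Str.isIn snl (PySem.Str.lower n) then some (pvCodeOf s) else pvScanSub snl t
    | none => pvScanSub snl t

-- third loop of A: stop['name'].lower() in station_name_lower
def pvScanRev (snl : String) : List (List (String × String)) → Option String
  | [] => none
  | s :: t =>
    match pvNameOf s with
    | some n =>
      if PySem.Str.isIn (PySem.Str.lower n) snl then some (pvCodeOf s) else pvScanRev snl t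
    | none => pvScanRev snl t

def find_stop_code_by_name (stops : List (List (String × String))) (station_name : String) : Option String :=
  let snl := PySem.Str.lower (PySem.Str.strip station_name)
  match pvScanExact snl stops with
  | some v => some v
  | none =>
    match pvScanSub snl stops with
    | some v => some v
    | none =>
      match pvScanRev snl stops with
      | some v => some v
      | none => none

-- ===== PORT B =====
-- single pass; sub/rev are the first-substring and first-reverse candidates found so far
def pvGo (snl : String) : List (List (String × String)) → Option String → Option String → Option String
  | [], sub, rev => match sub with | some v => some v | none => rev
  | s :: t, sub, rev =>
    match pvNameOf s with
    | some n =>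
      let nl := PySem.Str.lower n
      if PySem.Str.lower (PySem.Str.strip n) = snl then some (pvCodeOf s)
      else
        let sub' := match sub with
          | some v => some v
          | none => if PySem.Str.isIn snl nl then some (pvCodeOf s) else none
        let rev' := match rev with
          | some v => some v
          | none => if PySem.Str.isIn nl snl then some (pvCodeOf s) else none
        pvGo snl t sub' rev'
    | none => pvGo snl t sub rev

def find_stop_code_by_name_alt (stops : List (List (String × String))) (station_name : String) : Option String :=
  pvGo (PySem.Str.lower (PySem.Str.strip station_name)) stops none none

-- ===== PRECONDITION & SPEC =====
def Spec_find_stop_code_by_name (stops : List (List (String × String))) (station_name : String) (out : Option String) : Prop := out = find_stop_code_by_name_alt stops station_name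
instance (stops : List (List (String × String))) (station_name : String) (out : Option String) : Decidable (Spec_find_stop_code_by_name stops station_name out) := by unfold Spec_find_stop_code_by_name; infer_instance

-- ===== CLAIM (what is proved, stated in full; the proofs are below) =====
def Claim_equal_find_stop_code_by_name : Prop := ∀ (stops : List (List (String × String))) (station_name : String), Dom_find_stop_code_by_name stops station_name → Spec_find_stop_code_by_name stops station_name (find_stop_code_by_name stops station_name)

-- ===== LEMMAS AND PROOFS =====

-- the single pass with candidates sub, rev equals A's three-scan priority chain
lemma pvGo_eq (snl : String) (t : List (List (String × String))) :
    ∀ sub rev, pvGo snl t sub rev =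
      match pvScanExact snl t with
      | some v => some v
      | none =>
        match sub with
        | some v => some v
        | none =>
          match pvScanSub snl t with
          | some v => some v
          | none =>
            match rev with
            | some v => some v
            | none => pvScanRev snl t := by
  induction t with
  | nil =>
    intro sub rev
    cases sub <;> cases rev <;> simp [pvGo, pvScanExact, pvScanSub, pvScanRev]
  | cons s t ih =>
    intro sub rev
    simp only [pvGo, pvScanExact, pvScanSub, pvScanRev]
    cases h : pvNameOf s with
    | none => simp [ih]
    | some n =>
      by_cases he : PySem.Str.lower (PySem.Str.strip n) = snl
      · simp [he]
      · simp only [he, if_false, ih]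
        cases sub <;> cases rev <;>
          by_cases h1 : PySem.Chars.isIn snl.toList (PySem.Chars.lower n.toList) = true <;>
          by_cases h2 : PySem.Chars.isIn (PySem.Chars.lower n.toList) snl.toList = true <;>
          simp [PySem.Str.isIn, h1, h2]

-- ===== VERDICT (by name: the statement is the Claim_ definition above) =====
theorem find_stop_code_by_name_spec : Claim_equal_find_stop_code_by_name := by
  intro stops station_name _
  unfold Spec_find_stop_code_by_name find_stop_code_by_name find_stop_code_by_name_alt
  rw [pvGo_eq]
  cases h1 : pvScanExact (PySem.Str.lower (PySem.Str.strip station_name)) stops <;>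
    cases h2 : pvScanSub (PySem.Str.lower (PySem.Str.strip station_name)) stops <;>
    cases h3 : pvScanRev (PySem.Str.lower (PySem.Str.strip station_name)) stops <;>
    simp [h1, h2, h3]
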